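-- pv_equiv track=rewrite | github.com/fidalgomario/Hackerrank | Hackonacci Matrix Rotations/solution.py | changesCount
-- ===== SOURCE A (Python) =====
-- def changesCount(matrix, degree):
--     count = 0
--     if(degree == 90):
--         for x in range(len(matrix)):
--             for i in range(len(matrix)):
--                 if(matrix[x][i] != matrix[len(matrix) - 1 - i][x]):
--                     count += 1
--     elif(degree == 180):
--         for x in range(len(matrix)):
--             for i in range(len(matrix)):
--                 if(matrix[x][i] != matrix[len(matrix) - 1 - x][len(matrix) - 1 - i]):
--                     count += 1
--     elif(degree == 270):
--         for x in range(len(matrix)):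
--             for i in range(len(matrix)):
--                 if(matrix[x][i] != matrix[i][len(matrix) - 1 - x]):
--                     count += 1
--
--     return count
-- ===== SOURCE B (Python) =====
-- def changesCount(matrix, degree):
--     if degree not in (90, 180, 270):
--         return 0
--     n = len(matrix)
--     count = 0
--     for x in range((n + 1) // 2):
--         for i in range(n // 2):
--             a = matrix[x][i]
--             b = matrix[n - 1 - i][x]
--             c = matrix[n - 1 - x][n - 1 - i]
--             d = matrix[i][n - 1 - x]
--             if degree == 90:
--                 count += (a != b) + (b != c) + (c != d) + (d != a)
--             elif degree == 180:
--                 count += 2 * ((a != c) + (b != d))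
--             else:
--                 count += (a != d) + (b != a) + (c != b) + (d != c)
--     return count
-- ===== Notes on version B (the rewrite author's own statement) =====
-- stated objective: alternative
-- what changed: B iterates only over one quadrant of the square, treating each (x,i) there as a representative of its 4-cell 90-degree-rotation orbit, and adds the whole orbit's contribution for the requested degree at once (using that 180 = two opposite pairs, each counted twice), instead of A's scan of all n^2 cells with an inline rotated-index comparison per cell.
import Mathlib
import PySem

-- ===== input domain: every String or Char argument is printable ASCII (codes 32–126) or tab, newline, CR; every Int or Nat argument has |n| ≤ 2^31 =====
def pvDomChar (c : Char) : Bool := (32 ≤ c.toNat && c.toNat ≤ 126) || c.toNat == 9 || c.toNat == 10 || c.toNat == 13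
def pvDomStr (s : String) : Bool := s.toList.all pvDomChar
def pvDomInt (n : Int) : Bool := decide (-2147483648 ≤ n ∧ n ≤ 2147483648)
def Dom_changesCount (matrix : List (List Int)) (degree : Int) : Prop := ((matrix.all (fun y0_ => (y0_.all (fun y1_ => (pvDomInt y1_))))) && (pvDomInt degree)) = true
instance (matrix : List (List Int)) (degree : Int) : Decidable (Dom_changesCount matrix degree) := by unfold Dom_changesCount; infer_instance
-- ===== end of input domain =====

-- B visits only one quadrant of the square and aggregates each 4-cell rotation orbit at once
-- (objective: alternative algorithm — orbit decomposition instead of a full-grid scan). Return values only.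

-- ===== PORT A =====
def changesCount (matrix : List (List Int)) (degree : Int) : Int :=
  let n : Int := matrix.length
  if degree = 90 then
    (PySem.List.pyRange 0 n 1).foldl (fun count x =>
      (PySem.List.pyRange 0 n 1).foldl (fun count i =>
        if PySem.List.pyGetD (PySem.List.pyGetD matrix x []) i 0 ≠
           PySem.List.pyGetD (PySem.List.pyGetD matrix (n - 1 - i) []) x 0
        then count + 1 else count) count) 0
  else if degree = 180 then
    (PySem.List.pyRange 0 n 1).foldl (fun count x =>
      (PySem.List.pyRange 0 n 1).foldl (fun count i =>
        if PySem.List.pyGetD (PySem.List.pyGetD matrix x []) i 0 ≠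
           PySem.List.pyGetD (PySem.List.pyGetD matrix (n - 1 - x) []) (n - 1 - i) 0
        then count + 1 else count) count) 0
  else if degree = 270 then
    (PySem.List.pyRange 0 n 1).foldl (fun count x =>
      (PySem.List.pyRange 0 n 1).foldl (fun count i =>
        if PySem.List.pyGetD (PySem.List.pyGetD matrix x []) i 0 ≠
           PySem.List.pyGetD (PySem.List.pyGetD matrix i []) (n - 1 - x) 0
        then count + 1 else count) count) 0
  else 0

-- ===== PORT B =====
-- B: loop over the quadrant x < (n+1)//2, i < n//2; each (x,i) represents the 4-cycle
-- (x,i) -> (n-1-i,x) -> (n-1-x,n-1-i) -> (i,n-1-x) of the 90° rotation; add the orbit's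
-- whole contribution for the requested degree at once.
def changesCount_alt (matrix : List (List Int)) (degree : Int) : Int :=
  if degree = 90 ∨ degree = 180 ∨ degree = 270 then
    let n : Int := matrix.length
    (PySem.List.pyRange 0 (PySem.Int.floordiv (n + 1) 2) 1).foldl (fun count x =>
      (PySem.List.pyRange 0 (PySem.Int.floordiv n 2) 1).foldl (fun count i =>
        let a := PySem.List.pyGetD (PySem.List.pyGetD matrix x []) i 0
        let b := PySem.List.pyGetD (PySem.List.pyGetD matrix (n - 1 - i) []) x 0
        let c := PySem.List.pyGetD (PySem.List.pyGetD matrix (n - 1 - x) []) (n - 1 - i) 0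
        let d := PySem.List.pyGetD (PySem.List.pyGetD matrix i []) (n - 1 - x) 0
        count +
          (if degree = 90 then
            (if a ≠ b then 1 else 0) + (if b ≠ c then 1 else 0) +
            (if c ≠ d then 1 else 0) + (if d ≠ a then 1 else 0)
          else if degree = 180 then
            2 * ((if a ≠ c then 1 else 0) + (if b ≠ d then 1 else 0))
          else
            (if a ≠ d then 1 else 0) + (if b ≠ a then 1 else 0) +
            (if c ≠ b then 1 else 0) + (if d ≠ c then 1 else 0))) count) 0
  else 0

-- ===== PRECONDITION & SPEC =====
-- Pre_ excludes, under a recognized degree, matrices with a row shorter than len(matrix):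
-- there A raises IndexError (A reads every row at all columns < len(matrix)).
def Pre_changesCount (matrix : List (List Int)) (degree : Int) : Prop :=
  (degree = 90 ∨ degree = 180 ∨ degree = 270) → ∀ r ∈ matrix, matrix.length ≤ r.length
instance (matrix : List (List Int)) (degree : Int) : Decidable (Pre_changesCount matrix degree) := by
  unfold Pre_changesCount; infer_instance

def pvWitness_changesCount : List (List Int) × Int := ([[1, 2], [3, 4]], 90)

def Spec_changesCount (matrix : List (List Int)) (degree : Int) (out : Int) : Prop := out = changesCount_alt matrix degree
instance (matrix : List (List Int)) (degree : Int) (out : Int) : Decidable (Spec_changesCount matrix degree out) := by unfold Spec_changesCount; infer_instance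

-- ===== CLAIM (what is proved, stated in full; the proofs are below) =====
def Claim_equal_changesCount : Prop := ∀ (matrix : List (List Int)) (degree : Int), Dom_changesCount matrix degree → Pre_changesCount matrix degree → Spec_changesCount matrix degree (changesCount matrix degree)

-- ===== LEMMAS AND PROOFS =====

-- cell value at a (row, column) pair of Nat indices
def pvV (m : List (List Int)) (p : Nat × Nat) : Int := (m.getD p.1 []).getD p.2 0

-- the 4-cell orbit of quadrant representative (x,i) under the 90° rotation of an n×n grid
def pvOrbit (n : Nat) (p : Nat × Nat) : List (Nat × Nat) :=
  [p, (n - 1 - p.2, p.1), (n - 1 - p.1, n - 1 - p.2), (p.2, n - 1 - p.1)]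

-- the list of all (x, i) with x < a, i < b, row-major
def pvProd (a b : Nat) : List (Nat × Nat) :=
  (List.range a).flatMap (fun x => (List.range b).map (fun i => (x, i)))

-- false exactly at the centre cell of an odd-sized grid
def pvKeep (n : Nat) (p : Nat × Nat) : Bool := !(2 * p.1 + 1 == n && 2 * p.2 + 1 == n)

theorem mem_pvProd (a b : Nat) (p : Nat × Nat) : p ∈ pvProd a b ↔ p.1 < a ∧ p.2 < b := by
  cases p with
  | mk u v => simp [pvProd]

theorem nodup_pvProd (a b : Nat) : (pvProd a b).Nodup := by
  rw [pvProd, List.nodup_flatMap]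
  constructor
  · intro x _
    exact (List.nodup_range).map (fun i j h => by simpa using h)
  · refine List.Pairwise.imp_of_mem ?_ (List.nodup_range (n := a))
    intro x y _ _ hxy
    rw [Function.onFun, List.disjoint_left]
    intro p hp hq
    simp only [List.mem_map, List.mem_range] at hp hq
    obtain ⟨i, _, rfl⟩ := hp
    obtain ⟨j, _, h⟩ := hq
    exact hxy (by injection h with h1 h2; exact h1.symm)

-- A's nested counting loops as a sum over rows of index counts
theorem aLoop_eq_sum (m : List (List Int)) (p : Int → Int → Bool) :
    (PySem.List.pyRange 0 (m.length : Int) 1).foldl (fun count x =>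
      (PySem.List.pyRange 0 (m.length : Int) 1).foldl (fun count i =>
        if p x i then count + 1 else count) count) 0
    = ((List.range m.length).map (fun x : Nat =>
        ((List.range m.length).countP (fun i : Nat => p (x : Int) (i : Int)) : Int))).sum := by
  rw [PySem.List.pyRange_zero_natCast, List.foldl_map]
  calc _ = (List.range m.length).foldl (fun count (x : Nat) =>
        count + ((List.range m.length).countP (fun i : Nat => p (x : Int) (i : Int)) : Int)) 0 := by
        apply PySem.List.foldl_congr_mem
        intro c x _
        rw [List.foldl_map, PySem.List.foldl_count_if (fun i : Nat => p (x : Int) (i : Int))]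
    _ = _ := by rw [PySem.List.foldl_add]; simp

-- Prop-valued variant, matching the ite shape of A's port
theorem aLoop_eq_sum' (m : List (List Int)) (p : Int → Int → Prop) [inst : ∀ x i, Decidable (p x i)] :
    (PySem.List.pyRange 0 (m.length : Int) 1).foldl (fun count x =>
      (PySem.List.pyRange 0 (m.length : Int) 1).foldl (fun count i =>
        if p x i then count + 1 else count) count) 0
    = ((List.range m.length).map (fun x : Nat =>
        ((List.range m.length).countP (fun i : Nat => decide (p (x : Int) (i : Int))) : Int))).sum := by
  have h := aLoop_eq_sum m (fun x i => decide (p x i))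
  simpa using h

-- B's nested loops as a nested sum over the quadrant of its per-orbit terms
theorem bLoop_eq_sum (len : Nat) (t : Int → Int → Int) :
    (PySem.List.pyRange 0 (PySem.Int.floordiv ((len : Int) + 1) 2) 1).foldl (fun count x =>
      (PySem.List.pyRange 0 (PySem.Int.floordiv (len : Int) 2) 1).foldl (fun count i =>
        count + t x i) count) 0
    = ((List.range ((len + 1) / 2)).map (fun x : Nat =>
        ((List.range (len / 2)).map (fun i : Nat => t (x : Int) (i : Int))).sum)).sum := by
  have h1 : PySem.Int.floordiv ((len : Int) + 1) 2 = (((len + 1) / 2 : Nat) : Int) := by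
    rw [show ((len : Int) + 1) = ((len + 1 : Nat) : Int) by push_cast; ring]
    exact_mod_cast PySem.Int.floordiv_natCast (len + 1) 2
  have h2 : PySem.Int.floordiv (len : Int) 2 = ((len / 2 : Nat) : Int) := by
    exact_mod_cast PySem.Int.floordiv_natCast len 2
  rw [h1, h2]
  simp only [PySem.List.pyRange_zero_natCast]
  rw [List.foldl_map]
  calc _ = (List.range ((len + 1) / 2)).foldl (fun count (x : Nat) =>
        count + ((List.range (len / 2)).map (fun i : Nat => t (x : Int) (i : Int))).sum) 0 := by
        apply PySem.List.foldl_congr_mem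
        intro c x _
        rw [List.foldl_map]
        exact PySem.List.foldl_add _ (fun i : Nat => t (x : Int) (i : Int)) _
    _ = _ := by rw [PySem.List.foldl_add]; simp

-- sum of row countP's is the countP over the whole product grid
theorem sum_count_grid (n : Nat) (q : Nat × Nat → Bool) :
    ((List.range n).map (fun x : Nat =>
      (((List.range n).countP (fun i : Nat => q (x, i)) : Nat) : Int))).sum
    = (((pvProd n n).countP q : Nat) : Int) := by
  rw [pvProd, List.countP_flatMap]
  rw [Nat.cast_list_sum, List.map_map]
  congr 1
  apply List.map_congr_left
  intro x _
  simp [List.countP_map, Function.comp_def]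

-- dropping the centre cell does not change a count whose predicate is false there
theorem countP_filter_keep (n : Nat) (q : Nat × Nat → Bool)
    (hc : ∀ p : Nat × Nat, 2 * p.1 + 1 = n → 2 * p.2 + 1 = n → q p = false) :
    ((pvProd n n).filter (pvKeep n)).countP q = (pvProd n n).countP q := by
  rw [List.countP_filter]
  apply List.countP_congr
  intro p _
  by_cases h : pvKeep n p = true
  · simp [h]
  · have : 2 * p.1 + 1 = n ∧ 2 * p.2 + 1 = n := by
      simpa [pvKeep, -Bool.not_eq_true] using h
    simp [hc p this.1 this.2, h]

-- each orbit of a quadrant representative has four distinct cells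
theorem orbit_nodup (n x i : Nat) (hx : x < (n + 1) / 2) (hi : i < n / 2) :
    (pvOrbit n (x, i)).Nodup := by
  simp [pvOrbit, Prod.ext_iff]
  omega

-- orbits of distinct quadrant representatives are disjoint
theorem orbit_disjoint (n : Nat) (r s : Nat × Nat) (hr : r ∈ pvProd ((n + 1) / 2) (n / 2))
    (hs : s ∈ pvProd ((n + 1) / 2) (n / 2)) (hne : r ≠ s) :
    (pvOrbit n r).Disjoint (pvOrbit n s) := by
  rw [mem_pvProd] at hr hs
  obtain ⟨x1, i1⟩ := r
  obtain ⟨x2, i2⟩ := s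
  simp only at hr hs
  intro p hp hq
  simp only [pvOrbit, List.mem_cons, List.not_mem_nil, or_false] at hp hq
  apply hne
  rcases hp with rfl | rfl | rfl | rfl <;>
    rcases hq with h | h | h | h <;>
      (rw [Prod.ext_iff] at h ⊢; simp only at h ⊢; omega)

-- the quadrant orbits tile the grid minus the centre cell
theorem orbit_perm (n : Nat) :
    ((pvProd ((n + 1) / 2) (n / 2)).flatMap (pvOrbit n)).Perm
      ((pvProd n n).filter (pvKeep n)) := by
  apply (List.perm_ext_iff_of_nodup ?_ ?_).mpr
  · intro p
    constructor
    · intro hp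
      simp only [List.mem_flatMap] at hp
      obtain ⟨r, hr, hpr⟩ := hp
      rw [mem_pvProd] at hr
      obtain ⟨x, i⟩ := r
      simp only at hr
      rw [List.mem_filter, mem_pvProd]
      simp only [pvOrbit, List.mem_cons, List.not_mem_nil, or_false] at hpr
      have hk : ∀ u v : Nat, u < n → v < n → ¬(2 * u + 1 = n ∧ 2 * v + 1 = n) →
          pvKeep n (u, v) = true := by
        intro u v _ _ h
        simp only [pvKeep, Bool.not_eq_eq_eq_not, Bool.not_true, Bool.and_eq_false_iff,
          beq_eq_false_iff_ne, ne_eq]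
        omega
      rcases hpr with rfl | rfl | rfl | rfl <;>
        exact ⟨⟨by omega, by omega⟩, hk _ _ (by omega) (by omega) (by omega)⟩
    · intro hp
      rw [List.mem_filter, mem_pvProd] at hp
      obtain ⟨⟨hu, hv⟩, hkeep⟩ := hp
      obtain ⟨u, v⟩ := p
      simp only at hu hv
      have hnc : ¬(2 * u + 1 = n ∧ 2 * v + 1 = n) := by
        intro h
        simp [pvKeep, h.1, h.2] at hkeep
      have hcase : (u < (n + 1) / 2 ∧ v < n / 2) ∨
          (n - 1 - v < (n + 1) / 2 ∧ u < n / 2) ∨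
          (n - 1 - u < (n + 1) / 2 ∧ n - 1 - v < n / 2) ∨
          (v < (n + 1) / 2 ∧ n - 1 - u < n / 2) := by omega
      simp only [List.mem_flatMap]
      rcases hcase with h | h | h | h
      · exact ⟨(u, v), (mem_pvProd _ _ _).mpr ⟨h.1, h.2⟩, by simp [pvOrbit]⟩
      · exact ⟨(n - 1 - v, u), (mem_pvProd _ _ _).mpr ⟨h.1, h.2⟩,
          by simp [pvOrbit, Prod.ext_iff]; omega⟩
      · exact ⟨(n - 1 - u, n - 1 - v), (mem_pvProd _ _ _).mpr ⟨h.1, h.2⟩,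
          by simp [pvOrbit, Prod.ext_iff]; omega⟩
      · exact ⟨(v, n - 1 - u), (mem_pvProd _ _ _).mpr ⟨h.1, h.2⟩,
          by simp [pvOrbit, Prod.ext_iff]; omega⟩
  · rw [List.nodup_flatMap]
    constructor
    · intro r hr
      rw [mem_pvProd] at hr
      obtain ⟨x, i⟩ := r
      exact orbit_nodup n x i hr.1 hr.2
    · refine List.Pairwise.imp_of_mem ?_ (nodup_pvProd _ _)
      intro r s hr hs hne
      exact orbit_disjoint n r s hr hs hne
  · exact (nodup_pvProd n n).filter _

-- the count over the tiled grid is the quadrant sum of per-orbit counts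
theorem count_flatMap_eq_sum (n : Nat) (q : Nat × Nat → Bool) :
    ((((pvProd ((n + 1) / 2) (n / 2)).flatMap (pvOrbit n)).countP q : Nat) : Int)
    = ((List.range ((n + 1) / 2)).map (fun x : Nat =>
        ((List.range (n / 2)).map (fun i : Nat =>
          (((pvOrbit n (x, i)).countP q : Nat) : Int))).sum)).sum := by
  rw [List.countP_flatMap, pvProd, List.map_flatMap]
  rw [List.flatMap_def, List.sum_flatten, Nat.cast_list_sum, List.map_map, List.map_map]
  congr 1
  apply List.map_congr_left
  intro x _
  simp only [Function.comp_def, List.map_map]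
  rw [Nat.cast_list_sum, List.map_map]
  rfl

-- a count over a four-element list, written out
theorem countP_four {α : Type} (q : α → Bool) (p1 p2 p3 p4 : α) :
    ((([p1, p2, p3, p4] : List α).countP q : Nat) : Int)
    = (if q p1 then 1 else 0) + (if q p2 then 1 else 0) +
      (if q p3 then 1 else 0) + (if q p4 then 1 else 0) := by
  simp only [List.countP_cons, List.countP_nil]
  split_ifs <;> norm_num

theorem iteNe_comm (u v : Int) : (if u ≠ v then (1 : Int) else 0) = (if v ≠ u then 1 else 0) := by
  rcases eq_or_ne u v with rfl | h
  · simp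
  · simp [h, h.symm]

theorem main90 (m : List (List Int)) :
    changesCount m 90 = changesCount_alt m 90 := by
  have hq : ∀ p : Nat × Nat, 2 * p.1 + 1 = m.length → 2 * p.2 + 1 = m.length →
      (decide (pvV m p ≠ pvV m (m.length - 1 - p.2, p.1))) = false := by
    rintro ⟨u, v⟩ h1 h2
    simp only at h1 h2
    have e1 : m.length - 1 - v = u := by omega
    have e2 : v = u := by omega
    subst e2
    simp [e1]
  rw [show changesCount m 90 = (PySem.List.pyRange 0 ((m.length : Int)) 1).foldl (fun count x =>
    (PySem.List.pyRange 0 ((m.length : Int)) 1).foldl (fun count i =>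
      if PySem.List.pyGetD (PySem.List.pyGetD m x []) i 0 ≠
         PySem.List.pyGetD (PySem.List.pyGetD m ((m.length : Int) - 1 - i) []) x 0
      then count + 1 else count) count) 0 from rfl]
  rw [aLoop_eq_sum' m (fun x i => PySem.List.pyGetD (PySem.List.pyGetD m x []) i 0 ≠
      PySem.List.pyGetD (PySem.List.pyGetD m ((m.length : Int) - 1 - i) []) x 0)]
  rw [show changesCount_alt m 90 =
    (PySem.List.pyRange 0 (PySem.Int.floordiv ((m.length : Int) + 1) 2) 1).foldl (fun count x =>
      (PySem.List.pyRange 0 (PySem.Int.floordiv ((m.length : Int)) 2) 1).foldl (fun count i =>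
        count +
          ((if PySem.List.pyGetD (PySem.List.pyGetD m x []) i 0 ≠
              PySem.List.pyGetD (PySem.List.pyGetD m ((m.length : Int) - 1 - i) []) x 0 then 1 else 0) +
           (if PySem.List.pyGetD (PySem.List.pyGetD m ((m.length : Int) - 1 - i) []) x 0 ≠
              PySem.List.pyGetD (PySem.List.pyGetD m ((m.length : Int) - 1 - x) []) ((m.length : Int) - 1 - i) 0 then 1 else 0) +
           (if PySem.List.pyGetD (PySem.List.pyGetD m ((m.length : Int) - 1 - x) []) ((m.length : Int) - 1 - i) 0 ≠
              PySem.List.pyGetD (PySem.List.pyGetD m i []) ((m.length : Int) - 1 - x) 0 then 1 else 0) +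
           (if PySem.List.pyGetD (PySem.List.pyGetD m i []) ((m.length : Int) - 1 - x) 0 ≠
              PySem.List.pyGetD (PySem.List.pyGetD m x []) i 0 then 1 else 0))) count) 0 from rfl]
  rw [bLoop_eq_sum m.length]
  have hA : ((List.range m.length).map (fun x : Nat =>
      (((List.range m.length).countP (fun i : Nat =>
        decide (PySem.List.pyGetD (PySem.List.pyGetD m (x : Int) []) (i : Int) 0 ≠
          PySem.List.pyGetD (PySem.List.pyGetD m ((m.length : Int) - 1 - (i : Int)) []) (x : Int) 0)) : Nat) : Int))).sum
      = (((pvProd m.length m.length).countP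
          (fun p => decide (pvV m p ≠ pvV m (m.length - 1 - p.2, p.1))) : Nat) : Int) := by
    rw [← sum_count_grid]
    apply congrArg List.sum
    apply List.map_congr_left
    intro x hx
    have hx' : x < m.length := List.mem_range.mp hx
    congr 1
    apply List.countP_congr
    intro i hi
    have hi' : i < m.length := List.mem_range.mp hi
    rw [PySem.List.pyGetD_natCast m x [], PySem.List.pyGetD_natCast _ i 0,
      show ((m.length : Int) - 1 - (i : Int)) = ((m.length - 1 - i : Nat) : Int) by omega,
      PySem.List.pyGetD_natCast m (m.length - 1 - i) [], PySem.List.pyGetD_natCast _ x 0]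
    rfl
  rw [hA, ← countP_filter_keep m.length _ hq, ← (orbit_perm m.length).countP_eq,
    count_flatMap_eq_sum m.length]
  apply congrArg List.sum
  apply List.map_congr_left
  intro x hx
  apply congrArg List.sum
  apply List.map_congr_left
  intro i hi
  have hx' : x < (m.length + 1) / 2 := List.mem_range.mp hx
  have hi' : i < m.length / 2 := List.mem_range.mp hi
  rw [show ((m.length : Int) - 1 - (i : Int)) = ((m.length - 1 - i : Nat) : Int) by omega,
    show ((m.length : Int) - 1 - (x : Int)) = ((m.length - 1 - x : Nat) : Int) by omega]
  simp only [PySem.List.pyGetD_natCast]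
  rw [pvOrbit, countP_four]
  have r1 : m.length - 1 - (m.length - 1 - i) = i := by omega
  have r2 : m.length - 1 - (m.length - 1 - x) = x := by omega
  simp only [pvV, r1, r2, decide_not]
  simp

theorem two_pair (A B C D : Int) :
    (if A ≠ C then (1 : Int) else 0) + (if B ≠ D then 1 else 0) +
      (if C ≠ A then 1 else 0) + (if D ≠ B then 1 else 0)
    = 2 * ((if A ≠ C then 1 else 0) + (if B ≠ D then 1 else 0)) := by
  rw [iteNe_comm C A, iteNe_comm D B]; ring

theorem main180 (m : List (List Int)) :
    changesCount m 180 = changesCount_alt m 180 := by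
  have hq : ∀ p : Nat × Nat, 2 * p.1 + 1 = m.length → 2 * p.2 + 1 = m.length →
      (decide (pvV m p ≠ pvV m (m.length - 1 - p.1, m.length - 1 - p.2))) = false := by
    rintro ⟨u, v⟩ h1 h2
    simp only at h1 h2
    have e1 : m.length - 1 - u = u := by omega
    have e2 : m.length - 1 - v = v := by omega
    simp [e1, e2]
  rw [show changesCount m 180 = (PySem.List.pyRange 0 ((m.length : Int)) 1).foldl (fun count x =>
    (PySem.List.pyRange 0 ((m.length : Int)) 1).foldl (fun count i =>
      if PySem.List.pyGetD (PySem.List.pyGetD m x []) i 0 ≠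
         PySem.List.pyGetD (PySem.List.pyGetD m ((m.length : Int) - 1 - x) []) ((m.length : Int) - 1 - i) 0
      then count + 1 else count) count) 0 from rfl]
  rw [aLoop_eq_sum' m (fun x i => PySem.List.pyGetD (PySem.List.pyGetD m x []) i 0 ≠
      PySem.List.pyGetD (PySem.List.pyGetD m ((m.length : Int) - 1 - x) []) ((m.length : Int) - 1 - i) 0)]
  rw [show changesCount_alt m 180 =
    (PySem.List.pyRange 0 (PySem.Int.floordiv ((m.length : Int) + 1) 2) 1).foldl (fun count x =>
      (PySem.List.pyRange 0 (PySem.Int.floordiv ((m.length : Int)) 2) 1).foldl (fun count i =>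
        count +
          2 * ((if PySem.List.pyGetD (PySem.List.pyGetD m x []) i 0 ≠
              PySem.List.pyGetD (PySem.List.pyGetD m ((m.length : Int) - 1 - x) []) ((m.length : Int) - 1 - i) 0 then 1 else 0) +
           (if PySem.List.pyGetD (PySem.List.pyGetD m ((m.length : Int) - 1 - i) []) x 0 ≠
              PySem.List.pyGetD (PySem.List.pyGetD m i []) ((m.length : Int) - 1 - x) 0 then 1 else 0))) count) 0 from rfl]
  rw [bLoop_eq_sum m.length]
  have hA : ((List.range m.length).map (fun x : Nat =>
      (((List.range m.length).countP (fun i : Nat =>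
        decide (PySem.List.pyGetD (PySem.List.pyGetD m (x : Int) []) (i : Int) 0 ≠
          PySem.List.pyGetD (PySem.List.pyGetD m ((m.length : Int) - 1 - (x : Int)) []) ((m.length : Int) - 1 - (i : Int)) 0)) : Nat) : Int))).sum
      = (((pvProd m.length m.length).countP
          (fun p => decide (pvV m p ≠ pvV m (m.length - 1 - p.1, m.length - 1 - p.2))) : Nat) : Int) := by
    rw [← sum_count_grid]
    apply congrArg List.sum
    apply List.map_congr_left
    intro x hx
    have hx' : x < m.length := List.mem_range.mp hx
    congr 1
    apply List.countP_congr
    intro i hi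
    have hi' : i < m.length := List.mem_range.mp hi
    rw [PySem.List.pyGetD_natCast m x [], PySem.List.pyGetD_natCast _ i 0,
      show ((m.length : Int) - 1 - (x : Int)) = ((m.length - 1 - x : Nat) : Int) by omega,
      show ((m.length : Int) - 1 - (i : Int)) = ((m.length - 1 - i : Nat) : Int) by omega,
      PySem.List.pyGetD_natCast m (m.length - 1 - x) [], PySem.List.pyGetD_natCast _ (m.length - 1 - i) 0]
    rfl
  rw [hA, ← countP_filter_keep m.length _ hq, ← (orbit_perm m.length).countP_eq,
    count_flatMap_eq_sum m.length]
  apply congrArg List.sum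
  apply List.map_congr_left
  intro x hx
  apply congrArg List.sum
  apply List.map_congr_left
  intro i hi
  have hx' : x < (m.length + 1) / 2 := List.mem_range.mp hx
  have hi' : i < m.length / 2 := List.mem_range.mp hi
  rw [show ((m.length : Int) - 1 - (i : Int)) = ((m.length - 1 - i : Nat) : Int) by omega,
    show ((m.length : Int) - 1 - (x : Int)) = ((m.length - 1 - x : Nat) : Int) by omega]
  simp only [PySem.List.pyGetD_natCast]
  rw [pvOrbit, countP_four]
  have r1 : m.length - 1 - (m.length - 1 - i) = i := by omega
  have r2 : m.length - 1 - (m.length - 1 - x) = x := by omega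
  simp only [pvV, r1, r2, decide_eq_true_eq]
  exact two_pair _ _ _ _

theorem main270 (m : List (List Int)) :
    changesCount m 270 = changesCount_alt m 270 := by
  have hq : ∀ p : Nat × Nat, 2 * p.1 + 1 = m.length → 2 * p.2 + 1 = m.length →
      (decide (pvV m p ≠ pvV m (p.2, m.length - 1 - p.1))) = false := by
    rintro ⟨u, v⟩ h1 h2
    simp only at h1 h2
    have e1 : m.length - 1 - u = u := by omega
    have e2 : v = u := by omega
    subst e2
    simp [e1]
  rw [show changesCount m 270 = (PySem.List.pyRange 0 ((m.length : Int)) 1).foldl (fun count x =>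
    (PySem.List.pyRange 0 ((m.length : Int)) 1).foldl (fun count i =>
      if PySem.List.pyGetD (PySem.List.pyGetD m x []) i 0 ≠
         PySem.List.pyGetD (PySem.List.pyGetD m i []) ((m.length : Int) - 1 - x) 0
      then count + 1 else count) count) 0 from rfl]
  rw [aLoop_eq_sum' m (fun x i => PySem.List.pyGetD (PySem.List.pyGetD m x []) i 0 ≠
      PySem.List.pyGetD (PySem.List.pyGetD m i []) ((m.length : Int) - 1 - x) 0)]
  rw [show changesCount_alt m 270 =
    (PySem.List.pyRange 0 (PySem.Int.floordiv ((m.length : Int) + 1) 2) 1).foldl (fun count x =>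
      (PySem.List.pyRange 0 (PySem.Int.floordiv ((m.length : Int)) 2) 1).foldl (fun count i =>
        count +
          ((if PySem.List.pyGetD (PySem.List.pyGetD m x []) i 0 ≠
              PySem.List.pyGetD (PySem.List.pyGetD m i []) ((m.length : Int) - 1 - x) 0 then 1 else 0) +
           (if PySem.List.pyGetD (PySem.List.pyGetD m ((m.length : Int) - 1 - i) []) x 0 ≠
              PySem.List.pyGetD (PySem.List.pyGetD m x []) i 0 then 1 else 0) +
           (if PySem.List.pyGetD (PySem.List.pyGetD m ((m.length : Int) - 1 - x) []) ((m.length : Int) - 1 - i) 0 ≠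
              PySem.List.pyGetD (PySem.List.pyGetD m ((m.length : Int) - 1 - i) []) x 0 then 1 else 0) +
           (if PySem.List.pyGetD (PySem.List.pyGetD m i []) ((m.length : Int) - 1 - x) 0 ≠
              PySem.List.pyGetD (PySem.List.pyGetD m ((m.length : Int) - 1 - x) []) ((m.length : Int) - 1 - i) 0 then 1 else 0))) count) 0 from rfl]
  rw [bLoop_eq_sum m.length]
  have hA : ((List.range m.length).map (fun x : Nat =>
      (((List.range m.length).countP (fun i : Nat =>
        decide (PySem.List.pyGetD (PySem.List.pyGetD m (x : Int) []) (i : Int) 0 ≠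
          PySem.List.pyGetD (PySem.List.pyGetD m (i : Int) []) ((m.length : Int) - 1 - (x : Int)) 0)) : Nat) : Int))).sum
      = (((pvProd m.length m.length).countP
          (fun p => decide (pvV m p ≠ pvV m (p.2, m.length - 1 - p.1))) : Nat) : Int) := by
    rw [← sum_count_grid]
    apply congrArg List.sum
    apply List.map_congr_left
    intro x hx
    have hx' : x < m.length := List.mem_range.mp hx
    congr 1
    apply List.countP_congr
    intro i hi
    have hi' : i < m.length := List.mem_range.mp hi
    rw [PySem.List.pyGetD_natCast m x [], PySem.List.pyGetD_natCast _ i 0,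
      PySem.List.pyGetD_natCast m i [],
      show ((m.length : Int) - 1 - (x : Int)) = ((m.length - 1 - x : Nat) : Int) by omega,
      PySem.List.pyGetD_natCast _ (m.length - 1 - x) 0]
    rfl
  rw [hA, ← countP_filter_keep m.length _ hq, ← (orbit_perm m.length).countP_eq,
    count_flatMap_eq_sum m.length]
  apply congrArg List.sum
  apply List.map_congr_left
  intro x hx
  apply congrArg List.sum
  apply List.map_congr_left
  intro i hi
  have hx' : x < (m.length + 1) / 2 := List.mem_range.mp hx
  have hi' : i < m.length / 2 := List.mem_range.mp hi
  rw [show ((m.length : Int) - 1 - (i : Int)) = ((m.length - 1 - i : Nat) : Int) by omega,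
    show ((m.length : Int) - 1 - (x : Int)) = ((m.length - 1 - x : Nat) : Int) by omega]
  simp only [PySem.List.pyGetD_natCast]
  rw [pvOrbit, countP_four]
  have r1 : m.length - 1 - (m.length - 1 - i) = i := by omega
  have r2 : m.length - 1 - (m.length - 1 - x) = x := by omega
  simp only [pvV, r1, r2, decide_not]
  simp

-- ===== VERDICT (by name: the statement is the Claim_ definition above) =====
theorem changesCount_spec : Claim_equal_changesCount := by
  intro matrix degree _ _
  unfold Spec_changesCount
  by_cases h90 : degree = 90
  · subst h90; exact main90 matrix
  · by_cases h180 : degree = 180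
    · subst h180; exact main180 matrix
    · by_cases h270 : degree = 270
      · subst h270; exact main270 matrix
      · simp [changesCount, changesCount_alt, h90, h180, h270]
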